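-- pv_equiv track=rewrite | github.com/ahmadessamshahin/services | project/algorithms/ackermann.py | AckermannButtomUpEvaluation
-- ===== SOURCE A (Python) =====
-- def AckermannButtomUpEvaluation(m, n):
--   """memoization Buttom up approach
--     Args:
--         m (Int)
--         n (Int)
--
--     Returns:
--         Int: Ackermann value
--   """
--   # memoized Array to save calculated values
--   row= n+1 if(n==0 and m > 0 ) else n
--   col= m
--   lookup = [[0 for i in range(row + 1)] for j in range(col + 1)]
--   for rows in range(col + 1):
--       for cols in range(row + 1):
--           # base case A ( 0, row ) = row + 1
--           if rows == 0:
--               lookup[rows][cols] = cols + 1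
--           # base case  A ( col, 0 ) =
--           # A ( col-1, 1) [Computed already]
--           elif cols == 0:
--               lookup[rows][cols] = lookup[rows-1][1]
--           else:
--               # if rows and cols > 0
--               # then applying A ( col, row ) =
--               # A ( col-1, A ( col, row-1 ) )
--               r = rows - 1
--               c = lookup[rows][cols-1]
--               if r == 0:
--                   ans = c + 1
--               elif c <= row:
--                   ans = lookup[rows-1][lookup[rows][cols-1]]
--               else:
--                   ans = (c-row)*(r) + lookup[r][row]
--               lookup[rows][cols] = ans
--   return lookup[m][n]
-- ===== SOURCE B (Python) =====
-- def AckermannButtomUpEvaluation(m, n):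
--   """Compact-row evaluation: each row of the recurrence is represented by the
--   short prefix of values <= row plus closed-form parameters for its affine
--   (geometric) tail, instead of materialising every table cell."""
--   row = n + 1 if (n == 0 and m > 0) else n
--   if m == 0:
--     return n + 1
--
--   def ev(desc, x):
--     # value of the described row at column x (x >= 0)
--     i, pref, w, K = desc
--     if i == 0:
--       return x + 1
--     e = len(pref)
--     if x < e:
--       return pref[x]
--     t = x - e
--     if i == 1:
--       return w + t
--     r = i - 1
--     if r == 1:
--       return w + t * (K - row)
--     return r ** t * w + (K - r * row) * (r ** t - 1) // (r - 1)
--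
--   desc = (0, [], 0, 0)
--   for i in range(1, m + 1):
--     v = ev(desc, 1)                 # g_i(0) = g_{i-1}(1)
--     pref = []
--     while v <= row:                 # values <= row: kept explicitly
--       pref.append(v)
--       v = v + 1 if i == 1 else ev(desc, v)
--     K = ev(desc, row) if i >= 2 else 0
--     desc = (i, pref, v, K)
--   return ev(desc, n)
-- ===== Notes on version B (the rewrite author's own statement) =====
-- stated objective: faster
-- what changed: Replaces A's eager filling of every cell of the (m+1)x(row+1) table with compact row descriptors: per row only the short prefix of values <= row is materialised and the rest of the row is evaluated by a closed-form arithmetic/geometric tail formula (integer pow and exact division), iterating once over the rows.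
import Mathlib
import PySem

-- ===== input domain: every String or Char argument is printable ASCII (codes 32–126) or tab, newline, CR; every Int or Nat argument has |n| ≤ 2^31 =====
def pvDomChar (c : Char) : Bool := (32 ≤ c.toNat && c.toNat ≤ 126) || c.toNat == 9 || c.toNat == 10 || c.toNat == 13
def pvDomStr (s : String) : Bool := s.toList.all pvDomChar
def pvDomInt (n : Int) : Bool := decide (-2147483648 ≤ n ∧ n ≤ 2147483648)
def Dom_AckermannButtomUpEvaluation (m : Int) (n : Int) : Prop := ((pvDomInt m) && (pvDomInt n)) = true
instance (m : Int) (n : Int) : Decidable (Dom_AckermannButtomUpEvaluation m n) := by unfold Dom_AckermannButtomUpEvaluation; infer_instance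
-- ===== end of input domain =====

-- B replaces A's eager (m+1)x(row+1) table filling with compact row descriptors:
-- the short prefix of values ≤ row plus closed-form parameters of the affine /
-- geometric tail of each row (objective: different algorithm).

-- ===== PORT A =====
-- lookup[i][j] read; Python raises IndexError where pyGet? is none — such reads
-- never happen inside Pre_, so the default 0 is unreached there.
def pvGet2A (l : List (List Int)) (i j : Int) : Int :=
  ((PySem.List.pyGet? l i).bind (fun r => PySem.List.pyGet? r j)).getD 0

-- lookup[i][j] = v for the nonnegative in-range indices the loops produce
def pvSet2A (l : List (List Int)) (i j : Nat) (v : Int) : List (List Int) :=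
  match l[i]? with
  | some r => l.set i (r.set j v)
  | none => l

def AckermannButtomUpEvaluation (m : Int) (n : Int) : Int :=
  let row : Int := if n = 0 ∧ m > 0 then n + 1 else n
  let col : Int := m
  let init : List (List Int) :=
    (PySem.List.pyRange 0 (col + 1) 1).map
      (fun _ => (PySem.List.pyRange 0 (row + 1) 1).map (fun _ => (0 : Int)))
  let final := (PySem.List.pyRange 0 (col + 1) 1).foldl (fun lookup rows =>
    (PySem.List.pyRange 0 (row + 1) 1).foldl (fun lookup cols =>
      if rows = 0 then
        pvSet2A lookup rows.toNat cols.toNat (cols + 1)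
      else if cols = 0 then
        pvSet2A lookup rows.toNat cols.toNat (pvGet2A lookup (rows - 1) 1)
      else
        let r := rows - 1
        let c := pvGet2A lookup rows (cols - 1)
        let ans :=
          if r = 0 then c + 1
          else if c ≤ row then pvGet2A lookup (rows - 1) (pvGet2A lookup rows (cols - 1))
          else (c - row) * r + pvGet2A lookup r row
        pvSet2A lookup rows.toNat cols.toNat ans) lookup) init
  pvGet2A final m n

-- ===== PORT B =====
-- Source B's ev(desc, x): value of the described row at column x.  Python's pref[x]
-- is read via pyGet? (in-range nonneg there); r ** t is ported as r ^ t.toNat,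
-- exact since t = x - e ≥ 0 on every reachable use; // is PySem.Int.floordiv.
def evB (R : Int) (desc : Int × List Int × Int × Int) (x : Int) : Int :=
  let i := desc.1
  let pref := desc.2.1
  let w := desc.2.2.1
  let K := desc.2.2.2
  if i = 0 then x + 1
  else
    let e : Int := (pref.length : Int)
    if x < e then (PySem.List.pyGet? pref x).getD 0
    else
      let t := x - e
      if i = 1 then w + t
      else
        let r := i - 1
        if r = 1 then w + t * (K - R)
        else r ^ t.toNat * w + (K - r * R) * PySem.Int.floordiv (r ^ t.toNat - 1) (r - 1)

-- Source B's `while v <= row` prefix loop; fuel is only a totality guard (the loop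
-- provably runs at most R+1 times, see buildPrefB_spec), never reached as 0 there.
def buildPrefB (R : Int) (i : Int) (desc : Int × List Int × Int × Int) :
    Nat → Int → List Int → List Int × Int
  | 0, v, acc => (acc.reverse, v)
  | fuel+1, v, acc =>
    if v ≤ R then
      let v' := if i = 1 then v + 1 else evB R desc v
      buildPrefB R i desc fuel v' (v :: acc)
    else (acc.reverse, v)

def AckermannButtomUpEvaluation_alt (m : Int) (n : Int) : Int :=
  let R : Int := if n = 0 ∧ m > 0 then n + 1 else n
  if m = 0 then n + 1
  else
    let desc :=
      (PySem.List.pyRange 1 (m + 1) 1).foldl (fun desc i =>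
        let v := evB R desc 1
        let p := buildPrefB R i desc (R + 2).toNat v []
        let K := if 2 ≤ i then evB R desc R else 0
        (i, p.1, p.2, K)) ((0 : Int), ([] : List Int), (0 : Int), (0 : Int))
    evB R desc n

-- ===== PRECONDITION & SPEC =====
-- Pre_ excludes exactly the inputs where A raises IndexError (negative m or n).
def Pre_AckermannButtomUpEvaluation (m : Int) (n : Int) : Prop := 0 ≤ m ∧ 0 ≤ n
instance (m : Int) (n : Int) : Decidable (Pre_AckermannButtomUpEvaluation m n) := by
  unfold Pre_AckermannButtomUpEvaluation; infer_instance
def pvWitness_AckermannButtomUpEvaluation : Int × Int := (3, 4)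

def Spec_AckermannButtomUpEvaluation (m : Int) (n : Int) (out : Int) : Prop :=
  out = AckermannButtomUpEvaluation_alt m n
instance (m : Int) (n : Int) (out : Int) : Decidable (Spec_AckermannButtomUpEvaluation m n out) := by
  unfold Spec_AckermannButtomUpEvaluation; infer_instance

-- ===== CLAIM (what is proved, stated in full; the proofs are below) =====
def Claim_equal_AckermannButtomUpEvaluation : Prop :=
  ∀ (m : Int) (n : Int), Dom_AckermannButtomUpEvaluation m n →
    Pre_AckermannButtomUpEvaluation m n →
    Spec_AckermannButtomUpEvaluation m n (AckermannButtomUpEvaluation m n)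

-- ===== LEMMAS AND PROOFS =====

-- The recurrence both programs compute (A by table filling, B by memoized recursion).
def Fk (R : Int) (i j : Nat) : Int :=
  match i, j with
  | 0, j => (j : Int) + 1
  | i + 1, 0 => Fk R i 1
  | i + 1, j + 1 =>
    let c := Fk R (i + 1) j
    if i = 0 then c + 1
    else if c ≤ R then Fk R i c.toNat
    else (c - R) * ((i + 1 : Nat) - 1 : Int) + Fk R i R.toNat
  termination_by (i, j)
  decreasing_by
    all_goals first
      | exact Prod.Lex.right (i+1) (Nat.lt_succ_self j)
      | exact Prod.Lex.left _ _ (Nat.lt_succ_self i)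

lemma Fk_zero (R : Int) (j : Nat) : Fk R 0 j = (j : Int) + 1 := by rw [Fk]
lemma Fk_succ_zero (R : Int) (i : Nat) : Fk R (i+1) 0 = Fk R i 1 := by rw [Fk]
lemma Fk_succ_succ (R : Int) (i j : Nat) : Fk R (i+1) (j+1) =
    (let c := Fk R (i + 1) j
    if i = 0 then c + 1
    else if c ≤ R then Fk R i c.toNat
    else (c - R) * ((i + 1 : Nat) - 1 : Int) + Fk R i R.toNat) := by rw [Fk]

lemma Fk_pos (R : Int) : ∀ i j, 1 ≤ Fk R i j := by
  intro i
  induction i with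
  | zero => intro j; rw [Fk_zero]; omega
  | succ i ih =>
    intro j
    induction j with
    | zero => rw [Fk_succ_zero]; exact ih 1
    | succ j ihj =>
      rw [Fk_succ_succ]
      simp only []
      split_ifs with h1 h2
      · omega
      · exact ih _
      · have := ih R.toNat
        have h3 : 1 ≤ (i + 1 : Int) - 1 := by omega
        have h4 : 1 ≤ Fk R (i+1) j - R := by omega
        push_cast
        nlinarith [ih R.toNat]

-- ===== A-side: the table equals Fk =====

-- the partially filled table: rows < i done, row i done up to column j
def Stab (R : Int) (M Rn i j : Nat) : List (List Int) :=
  (List.range (M+1)).map (fun a => (List.range (Rn+1)).map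
    (fun b => if a < i ∨ (a = i ∧ b < j) then Fk R a b else 0))

lemma pvGet2A_Stab (R : Int) (M Rn i j a b : Nat) (ha : a < M+1) (hb : b < Rn+1) :
    pvGet2A (Stab R M Rn i j) (a : Int) (b : Int) =
      if a < i ∨ (a = i ∧ b < j) then Fk R a b else 0 := by
  simp [pvGet2A, Stab, PySem.List.pyGet?_natCast, List.getElem?_map, List.getElem?_range, ha, hb]

lemma pvSet2A_Stab (R : Int) (M Rn i j : Nat) (hi : i < M+1) (hj : j < Rn+1) :
    pvSet2A (Stab R M Rn i j) i j (Fk R i j) = Stab R M Rn i (j+1) := by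
  have hrow : (Stab R M Rn i j)[i]? =
      some ((List.range (Rn+1)).map (fun b => if i < i ∨ (i = i ∧ b < j) then Fk R i b else 0)) := by
    simp [Stab, hi]
  rw [pvSet2A, hrow]
  dsimp only
  apply List.ext_getElem
  · simp [Stab]
  · intro k h1 h2
    simp only [Stab, List.getElem_set, List.getElem_map, List.getElem_range]
    by_cases hk : i = k
    · subst hk
      rw [if_pos rfl]
      apply List.ext_getElem
      · simp
      · intro b hb1 hb2
        simp only [List.getElem_set]
        by_cases hbj : j = b
        · subst hbj
          rw [if_pos rfl]
          simp
        · rw [if_neg hbj]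
          simp only [List.getElem_map, List.getElem_range, lt_self_iff_false, false_or,
            true_and, eq_self_iff_true]
          split_ifs <;> first | rfl | omega
    · rw [if_neg hk]
      apply List.map_congr_left
      intro b hb
      split_ifs <;> first | rfl | omega

lemma Stab_rollover (R : Int) (M Rn i : Nat) :
    Stab R M Rn i (Rn+1) = Stab R M Rn (i+1) 0 := by
  simp only [Stab]
  apply List.map_congr_left
  intro a _
  apply List.map_congr_left
  intro b hb
  simp only [List.mem_range] at hb
  split_ifs <;> first | rfl | omega

lemma foldl_range_build {α : Type} (f : α → Nat → α) (S : Nat → α) (n : Nat)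
    (hstep : ∀ k, k < n → f (S k) k = S (k+1)) :
    (List.range n).foldl f (S 0) = S n := by
  induction n with
  | zero => rfl
  | succ n ih =>
    rw [List.range_succ, List.foldl_append]
    rw [ih (fun k hk => hstep k (by omega))]
    exact hstep n (by omega)

lemma A_eq_Fk (m n : Int) (hm : 0 ≤ m) (hn : 0 ≤ n) :
    AckermannButtomUpEvaluation m n =
      Fk (if n = 0 ∧ m > 0 then n + 1 else n) m.toNat n.toNat := by
  unfold AckermannButtomUpEvaluation
  dsimp only
  generalize hR : (if n = 0 ∧ m > 0 then n + 1 else n : Int) = R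
  have hR0 : 0 ≤ R := by rw [← hR]; split_ifs <;> omega
  have hR1 : 1 ≤ m → 1 ≤ R := by rw [← hR]; split_ifs <;> omega
  set M := m.toNat with hM
  set N := n.toNat with hN
  set Rn := R.toNat with hRn
  have hmM : (M : Int) = m := Int.toNat_of_nonneg hm
  have hnN : (N : Int) = n := Int.toNat_of_nonneg hn
  have hRRn : (Rn : Int) = R := Int.toNat_of_nonneg hR0
  have hnR : n ≤ R := by rw [← hR]; split_ifs <;> omega
  have e1 : m + 1 = ((M + 1 : Nat) : Int) := by push_cast; omega
  have e2 : R + 1 = ((Rn + 1 : Nat) : Int) := by push_cast; omega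
  rw [e1, e2, PySem.List.pyRange_zero_nat, PySem.List.pyRange_zero_nat, List.foldl_map]
  have hinit : (List.map (fun _ => List.map (fun _ => (0:Int))
        (List.map (fun k => ((k : Nat) : Int)) (List.range (Rn + 1))))
      (List.map (fun k => ((k : Nat) : Int)) (List.range (M + 1)))) = Stab R M Rn 0 0 := by
    simp [Stab, List.map_map, Function.comp_def, Nat.not_lt_zero]
  rw [hinit]
  rw [foldl_range_build _ (fun i => Stab R M Rn i 0) (M+1) ?_]
  · rw [← hmM, ← hnN, pvGet2A_Stab R M Rn (M+1) 0 M N (by omega) (by omega)]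
    rw [if_pos (by omega)]
  · intro i hi
    dsimp only
    rw [List.foldl_map]
    rw [← Stab_rollover R M Rn i]
    apply foldl_range_build _ (fun j => Stab R M Rn i j) (Rn+1)
    intro k hk
    dsimp only
    simp only [Int.toNat_natCast]
    by_cases hi0 : i = 0
    · subst hi0
      rw [if_pos (by norm_num)]
      have hv : ((k : Int) + 1) = Fk R 0 k := by rw [Fk_zero]
      rw [hv, pvSet2A_Stab R M Rn 0 k hi hk]
    · have hii : ¬((i : Int) = 0) := by exact_mod_cast hi0
      rw [if_neg hii]
      have h1i : 1 ≤ i := by omega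
      have hRn1 : 1 ≤ Rn := by
        have hm1 : 1 ≤ m := by omega
        have := hR1 hm1
        omega
      by_cases hk0 : k = 0
      · subst hk0
        rw [if_pos (by norm_num)]
        have e3 : (i : Int) - 1 = ((i - 1 : Nat) : Int) := by omega
        have e4 : (1 : Int) = ((1 : Nat) : Int) := by norm_num
        rw [e3, e4, pvGet2A_Stab R M Rn i 0 (i-1) 1 (by omega) (by omega)]
        rw [if_pos (Or.inl (by omega))]
        have hfix : Fk R i 0 = Fk R (i-1) 1 := by
          conv_lhs => rw [show i = (i-1)+1 by omega]
          rw [Fk_succ_zero]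
        rw [← hfix, pvSet2A_Stab R M Rn i 0 hi (by omega)]
      · have hkk : ¬((k : Int) = 0) := by exact_mod_cast hk0
        rw [if_neg hkk]
        have e5 : (k : Int) - 1 = ((k - 1 : Nat) : Int) := by omega
        rw [e5, pvGet2A_Stab R M Rn i k i (k-1) (by omega) (by omega)]
        rw [if_pos (Or.inr ⟨rfl, by omega⟩)]
        set c := Fk R i (k-1) with hc
        have hc1 : 1 ≤ c := Fk_pos R i (k-1)
        by_cases h1 : (i : Int) - 1 = 0
        · have hieq : i = 1 := by omega
          subst hieq
          rw [if_pos h1]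
          have hfix : Fk R 1 k = c + 1 := by
            rw [hc]
            conv_lhs => rw [show k = (k-1)+1 by omega]
            rw [Fk_succ_succ]
            simp
          rw [← hfix, pvSet2A_Stab R M Rn 1 k hi hk]
        · rw [if_neg h1]
          have hi2 : 2 ≤ i := by omega
          by_cases h2 : c ≤ R
          · rw [if_pos h2]
            have e6 : c = ((c.toNat : Nat) : Int) := by omega
            have e3 : (i : Int) - 1 = ((i - 1 : Nat) : Int) := by omega
            rw [e3, e6, pvGet2A_Stab R M Rn i k (i-1) c.toNat (by omega) (by omega)]
            rw [if_pos (Or.inl (by omega))]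
            have hfix : Fk R i k = Fk R (i-1) c.toNat := by
              conv_lhs => rw [show i = (i-1)+1 by omega, show k = (k-1)+1 by omega]
              rw [Fk_succ_succ]
              dsimp only
              rw [show (i-1)+1 = i by omega, ← hc]
              rw [if_neg (show ¬(i-1=0) by omega), if_pos h2]
            rw [← hfix, pvSet2A_Stab R M Rn i k hi hk]
          · rw [if_neg h2]
            have e3 : (i : Int) - 1 = ((i - 1 : Nat) : Int) := by omega
            have hgR : pvGet2A (Stab R M Rn i k) ((i - 1 : Nat) : Int) R = Fk R (i-1) Rn := by
              conv_lhs => rw [← hRRn]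
              rw [pvGet2A_Stab _ M Rn i k (i-1) Rn (by omega) (by omega)]
              rw [if_pos (Or.inl (by omega))]
              rw [hRRn]
            rw [e3, hgR]
            have hfix : Fk R i k = (c - R) * ((i - 1 : Nat) : Int) + Fk R (i-1) Rn := by
              conv_lhs => rw [show i = (i-1)+1 by omega, show k = (k-1)+1 by omega]
              rw [Fk_succ_succ]
              dsimp only
              rw [show (i-1)+1 = i by omega, ← hc]
              rw [if_neg (show ¬(i-1=0) by omega), if_neg h2]
              rw [e3]
            rw [← hfix, pvSet2A_Stab R M Rn i k hi hk]

-- ===== B-side: the compact-row evaluator equals Fk =====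

lemma Fk_ge (R : Int) : ∀ (i j : Nat), ((j : Nat) : Int) + 1 ≤ Fk R i j := by
  intro i
  induction i with
  | zero => intro j; rw [Fk_zero]
  | succ i ih =>
    intro j
    induction j with
    | zero =>
      rw [Fk_succ_zero]
      have := ih 1
      omega
    | succ j ihj =>
      rw [Fk_succ_succ]
      dsimp only
      set c := Fk R (i+1) j with hc
      have hcj : (j : Int) + 1 ≤ c := ihj
      split_ifs with h1 h2
      · push_cast; omega
      · have h3 : c = ((c.toNat : Nat) : Int) := by omega
        have := ih c.toNat
        push_cast
        omega
      · have h4 : ((R.toNat : Nat) : Int) + 1 ≤ Fk R i R.toNat := ih R.toNat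
        have h5 : R ≤ ((R.toNat : Nat) : Int) := Int.self_le_toNat R
        have h6 : 1 ≤ c - R := by omega
        have h7 : (1 : Int) ≤ ((i + 1 : Nat) : Int) - 1 := by push_cast; omega
        have h8 : (c - R) * 1 ≤ (c - R) * (((i + 1 : Nat) : Int) - 1) :=
          mul_le_mul_of_nonneg_left h7 (by omega)
        push_cast at h8 ⊢
        omega

-- the first column index whose value exceeds R (exists since Fk R i j ≥ j + 1)
def eRowEx (R : Int) (i : Nat) : ∃ e, R < Fk R i e :=
  ⟨R.toNat, by have := Fk_ge R i R.toNat; have := Int.self_le_toNat R; omega⟩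

def eRow (R : Int) (i : Nat) : Nat := Nat.find (eRowEx R i)

lemma eRow_gt (R : Int) (i : Nat) : R < Fk R i (eRow R i) := Nat.find_spec (eRowEx R i)

lemma eRow_min (R : Int) (i : Nat) {j : Nat} (hj : j < eRow R i) : Fk R i j ≤ R := by
  have := Nat.find_min (eRowEx R i) hj
  omega

lemma eRow_le (R : Int) (i : Nat) : eRow R i ≤ R.toNat := by
  apply Nat.find_le
  have := Fk_ge R i R.toNat
  have := Int.self_le_toNat R
  omega

-- once a row's value exceeds R it stays above R (rows i ≥ 1)
lemma Fk_persist (R : Int) (i : Nat) (hi : 1 ≤ i) :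
    ∀ t, R < Fk R i (eRow R i + t) := by
  intro t
  induction t with
  | zero => exact eRow_gt R i
  | succ t ih =>
    obtain ⟨i', rfl⟩ : ∃ i', i = i' + 1 := ⟨i - 1, by omega⟩
    have heq : eRow R (i'+1) + (t+1) = (eRow R (i'+1) + t) + 1 := by omega
    rw [heq, Fk_succ_succ]
    dsimp only
    set c := Fk R (i'+1) (eRow R (i'+1) + t) with hc
    split_ifs with h1 h2
    · omega
    · omega
    · have h4 : ((R.toNat : Nat) : Int) + 1 ≤ Fk R i' R.toNat := Fk_ge R i' R.toNat
      have h5 : R ≤ ((R.toNat : Nat) : Int) := Int.self_le_toNat R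
      have h6 : 1 ≤ c - R := by omega
      have h7 : (1 : Int) ≤ ((i' + 1 : Nat) : Int) - 1 := by
        push_cast
        omega
      have h8 : (c - R) * 1 ≤ (c - R) * (((i' + 1 : Nat) : Int) - 1) :=
        mul_le_mul_of_nonneg_left h7 (by omega)
      omega

-- exceeding values are after eRow
lemma lt_eRow_of_le (R : Int) (i : Nat) (hi : 1 ≤ i) {j : Nat} (hj : Fk R i j ≤ R) :
    j < eRow R i := by
  by_contra h
  push_neg at h
  obtain ⟨t, rfl⟩ : ∃ t, j = eRow R i + t := ⟨j - eRow R i, by omega⟩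
  have := Fk_persist R i hi t
  omega

-- geometric sum 1 + r + … + r^(t-1), as Source B's (r**t - 1)//(r - 1) computes it
def geomS (r : Int) : Nat → Int
  | 0 => 0
  | t+1 => geomS r t * r + 1

lemma geomS_mul (r : Int) (t : Nat) : (r - 1) * geomS r t = r ^ t - 1 := by
  induction t with
  | zero => simp [geomS]
  | succ t ih =>
    rw [geomS, pow_succ]
    linear_combination r * ih

lemma floordiv_geomS (r : Int) (hr : 2 ≤ r) (t : Nat) :
    PySem.Int.floordiv (r ^ t - 1) (r - 1) = geomS r t := by
  rw [← geomS_mul r t, PySem.Int.floordiv_eq_ediv_of_pos (by omega)]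
  exact Int.mul_ediv_cancel_left _ (by omega)

-- the descriptor Source B's loop carries after processing rows 1..i
def DscB (R : Int) : Nat → Int × List Int × Int × Int
  | 0 => (0, [], 0, 0)
  | i+1 => (((i+1 : Nat) : Int),
      (List.range (eRow R (i+1))).map (fun j => Fk R (i+1) j),
      Fk R (i+1) (eRow R (i+1)),
      if 2 ≤ i+1 then Fk R i R.toNat else 0)

-- row 1 tail: +1 per column
lemma Fk_tail1 (R : Int) (T : Nat) :
    Fk R 1 (eRow R 1 + T) = Fk R 1 (eRow R 1) + (T : Int) := by
  induction T with
  | zero => simp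
  | succ T ih =>
    have heq : eRow R 1 + (T+1) = (eRow R 1 + T) + 1 := by omega
    rw [heq, Fk_succ_succ]
    dsimp only
    rw [if_pos rfl, ih]
    push_cast
    ring

-- row 2 tail: arithmetic progression with difference K - R
lemma Fk_tail2 (R : Int) (T : Nat) :
    Fk R 2 (eRow R 2 + T) = Fk R 2 (eRow R 2) + (T : Int) * (Fk R 1 R.toNat - R) := by
  induction T with
  | zero => simp
  | succ T ih =>
    have heq : eRow R 2 + (T+1) = (eRow R 2 + T) + 1 := by omega
    rw [heq]
    rw [show (2 : Nat) = 1 + 1 from rfl, Fk_succ_succ]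
    dsimp only
    rw [if_neg (by omega : ¬(1 = 0))]
    have hgt := Fk_persist R 2 (by omega) T
    rw [show (1:Nat)+1 = 2 from rfl] at *
    rw [if_neg (by omega : ¬(Fk R 2 (eRow R 2 + T) ≤ R)), ih]
    push_cast
    ring

-- rows i+1 with i ≥ 2: geometric tail with ratio i
lemma Fk_tail3 (R : Int) (i : Nat) (hi : 2 ≤ i) (T : Nat) :
    Fk R (i+1) (eRow R (i+1) + T) =
      (i : Int) ^ T * Fk R (i+1) (eRow R (i+1)) +
        (Fk R i R.toNat - (i : Int) * R) * geomS (i : Int) T := by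
  induction T with
  | zero => simp [geomS]
  | succ T ih =>
    have heq : eRow R (i+1) + (T+1) = (eRow R (i+1) + T) + 1 := by omega
    rw [heq, Fk_succ_succ]
    dsimp only
    rw [if_neg (by omega : ¬(i = 0))]
    have hgt := Fk_persist R (i+1) (by omega) T
    rw [if_neg (by omega : ¬(Fk R (i+1) (eRow R (i+1) + T) ≤ R)), ih]
    rw [geomS, pow_succ]
    push_cast
    ring

lemma evB_DscB (R : Int) (i : Nat) (x : Nat) :
    evB R (DscB R i) ((x : Nat) : Int) = Fk R i x := by
  cases i with
  | zero =>
    simp [evB, DscB, Fk_zero]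
  | succ i' =>
    rw [evB, DscB]
    dsimp only
    rw [if_neg (by push_cast; omega : ¬((((i'+1 : Nat)) : Int) = 0))]
    have hlen : ((List.range (eRow R (i'+1))).map (fun j => Fk R (i'+1) j)).length
        = eRow R (i'+1) := by simp
    rw [hlen]
    by_cases hx : x < eRow R (i'+1)
    · rw [if_pos (by exact_mod_cast hx)]
      rw [PySem.List.pyGet?_natCast]
      simp [hx]
    · rw [if_neg (by push_cast; omega)]
      obtain ⟨T, rfl⟩ : ∃ T, x = eRow R (i'+1) + T := ⟨x - eRow R (i'+1), by omega⟩
      have ht : ((eRow R (i'+1) + T : Nat) : Int) - ((eRow R (i'+1) : Nat) : Int)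
          = ((T : Nat) : Int) := by push_cast; omega
      rw [ht]
      by_cases h0 : i' = 0
      · subst h0
        rw [if_pos (by norm_num)]
        rw [Fk_tail1]
      · rw [if_neg (by push_cast; omega : ¬((((i'+1 : Nat)) : Int) = 1))]
        by_cases h1 : i' = 1
        · subst h1
          rw [if_pos (by norm_num : ((((1+1 : Nat)) : Int) - 1) = 1)]
          rw [if_pos (by omega : 2 ≤ 1 + 1)]
          rw [show (1:Nat)+1 = 2 from rfl, Fk_tail2]
        · have hi2 : 2 ≤ i' := by omega
          rw [if_neg (by push_cast; omega : ¬((((i'+1 : Nat)) : Int) - 1 = 1))]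
          rw [if_pos (by omega : 2 ≤ i' + 1)]
          have hr : (((i'+1 : Nat)) : Int) - 1 = (i' : Int) := by push_cast; ring
          have htn : (((T : Nat)) : Int).toNat = T := by simp
          rw [hr, htn, floordiv_geomS (i' : Int) (by exact_mod_cast hi2), Fk_tail3 R i' hi2]

lemma buildPrefB_spec (R : Int) (i : Nat) (hi : 1 ≤ i)
    (desc : Int × List Int × Int × Int)
    (hdesc : ∀ x : Nat, evB R desc ((x : Nat) : Int) = Fk R (i-1) x) :
    ∀ (f j : Nat) (acc : List Int), j ≤ eRow R i → eRow R i ≤ j + f →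
      buildPrefB R ((i : Nat) : Int) desc f (Fk R i j) acc =
        (acc.reverse ++ (List.range' j (eRow R i - j)).map (fun k => Fk R i k),
          Fk R i (eRow R i)) := by
  intro f
  induction f with
  | zero =>
    intro j acc hj1 hj2
    have hje : j = eRow R i := by omega
    subst hje
    simp [buildPrefB]
  | succ f ihf =>
    intro j acc hj1 hj2
    rw [buildPrefB]
    by_cases hv : Fk R i j ≤ R
    · rw [if_pos hv]
      have hjE : j < eRow R i := lt_eRow_of_le R i hi hv
      have hstep : (if ((i : Nat) : Int) = 1 then Fk R i j + 1 else evB R desc (Fk R i j))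
          = Fk R i (j+1) := by
        by_cases hi1 : i = 1
        · subst hi1
          rw [if_pos (by norm_num)]
          rw [show (1:Nat) = 0 + 1 from rfl, Fk_succ_succ]
          simp
        · rw [if_neg (by exact_mod_cast hi1)]
          have hc0 : 0 ≤ Fk R i j := by have := Fk_ge R i j; omega
          conv_rhs => rw [show i = (i-1)+1 by omega, Fk_succ_succ]
          dsimp only
          rw [show (i-1)+1 = i by omega]
          rw [if_neg (by omega : ¬(i - 1 = 0)), if_pos hv]
          conv_lhs => rw [show Fk R i j = (((Fk R i j).toNat : Nat) : Int) by omega]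
          rw [hdesc]
      rw [hstep]
      dsimp only
      rw [ihf (j+1) (Fk R i j :: acc) (by omega) (by omega)]
      have hcount : eRow R i - j = (eRow R i - (j+1)) + 1 := by omega
      rw [hcount, List.range'_succ]
      simp
    · rw [if_neg hv]
      have hje : j = eRow R i := by
        rcases Nat.lt_or_ge j (eRow R i) with h | h
        · exact absurd (eRow_min R i h) hv
        · omega
      subst hje
      simp

lemma DscB_step (R : Int) (hR0 : 0 ≤ R) (i : Nat) :
    (let desc := DscB R i
     let v := evB R desc 1
     let p := buildPrefB R (((i+1 : Nat) : Int)) desc (R + 2).toNat v []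
     let K := if 2 ≤ (((i+1 : Nat) : Int)) then evB R desc R else 0
     ((((i+1 : Nat) : Int)), p.1, p.2, K)) = DscB R (i+1) := by
  dsimp only
  have hd := evB_DscB R i
  have hv : evB R (DscB R i) 1 = Fk R (i+1) 0 := by
    rw [show (1 : Int) = ((1 : Nat) : Int) by norm_num, hd 1, Fk_succ_zero]
  rw [hv]
  have hbp := buildPrefB_spec R (i+1) (by omega) (DscB R i)
      (by intro x; simpa using hd x) ((R+2).toNat) 0 [] (by omega)
      (by have := eRow_le R (i+1); omega)
  rw [hbp]
  rw [List.reverse_nil, List.nil_append]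
  have hK : (if 2 ≤ (((i+1 : Nat) : Int)) then evB R (DscB R i) R else 0)
      = (if 2 ≤ i+1 then Fk R i R.toNat else 0) := by
    by_cases h : 1 ≤ i
    · rw [if_pos (by push_cast; omega), if_pos (by omega)]
      have hdr : evB R (DscB R i) R = Fk R i R.toNat := by
        have h2 := hd R.toNat
        rwa [show ((R.toNat : Nat) : Int) = R by omega] at h2
      rw [hdr]
    · have h0 : i = 0 := by omega
      subst h0
      rw [if_neg (by norm_num), if_neg (by omega)]
  rw [hK]
  rw [DscB]
  rw [show List.range' 0 (eRow R (i+1) - 0) = List.range (eRow R (i+1)) by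
    rw [Nat.sub_zero, List.range_eq_range']]

lemma B_eq_Fk (m n : Int) (hm : 0 ≤ m) (hn : 0 ≤ n) :
    AckermannButtomUpEvaluation_alt m n =
      Fk (if n = 0 ∧ m > 0 then n + 1 else n) m.toNat n.toNat := by
  unfold AckermannButtomUpEvaluation_alt
  dsimp only
  generalize hR : (if n = 0 ∧ m > 0 then n + 1 else n : Int) = R
  have hR0 : 0 ≤ R := by rw [← hR]; split_ifs <;> omega
  by_cases hm0 : m = 0
  · rw [if_pos hm0]
    simp only [hm0, Int.toNat_zero, Fk_zero]
    omega
  · rw [if_neg hm0]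
    set M := m.toNat with hM
    have f2 : (m + 1 - 1).toNat = M := by omega
    rw [PySem.List.pyRange_one 1 (m + 1), f2, List.foldl_map]
    have hinit : ((0 : Int), ([] : List Int), (0 : Int), (0 : Int)) = DscB R 0 := rfl
    rw [hinit]
    rw [foldl_range_build _ (fun k => DscB R k) M ?_]
    · conv_lhs => rw [show n = ((n.toNat : Nat) : Int) by omega]
      rw [evB_DscB R M n.toNat]
    · intro k hk
      have := DscB_step R hR0 k
      dsimp only at this
      rw [show (1 : Int) + (k : Nat) = (((k+1 : Nat)) : Int) by push_cast; ring]
      exact this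

-- ===== VERDICT (by name: the statement is the Claim_ definition above) =====
theorem AckermannButtomUpEvaluation_spec : Claim_equal_AckermannButtomUpEvaluation := by
  intro m n hdom hpre
  obtain ⟨hm, hn⟩ := hpre
  unfold Spec_AckermannButtomUpEvaluation
  rw [A_eq_Fk m n hm hn, B_eq_Fk m n hm hn]
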